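-- pv_equiv track=rewrite | github.com/RohitKumarPattanayak/Python-dsa-gateway | Cp7-Array-Problems/q10-medium-LEETCODE.py | consequetiveSum
-- ===== SOURCE A (Python) =====
-- def consequetiveSum(num,arr):
--     i=0
--     # j=1
--     count = 0
--     max_count = 0
--     while i<len(arr):
--         if arr[i]==num:
--             count+=1
--         else:
--             if count > max_count:
--                 max_count = count
--             count = 0
--         i+=1
--     return num*max_count
-- ===== SOURCE B (Python) =====
-- def consequetiveSum(num, arr):
--     seps = [i for i, x in enumerate(arr) if x != num]
--     best = 0
--     prev = -1
--     for s in seps: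
--         gap = s - prev - 1
--         if gap > best:
--             best = gap
--         prev = s
--     return num * best
-- ===== Notes on version B (the rewrite author's own statement) =====
-- stated objective: alternative
-- what changed: Instead of scanning every element with a running run-counter, B first collects the separator positions (indices of elements != num) and then derives each closed-run length as the gap between consecutive separators, maxing over those gaps.
import Mathlib
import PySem

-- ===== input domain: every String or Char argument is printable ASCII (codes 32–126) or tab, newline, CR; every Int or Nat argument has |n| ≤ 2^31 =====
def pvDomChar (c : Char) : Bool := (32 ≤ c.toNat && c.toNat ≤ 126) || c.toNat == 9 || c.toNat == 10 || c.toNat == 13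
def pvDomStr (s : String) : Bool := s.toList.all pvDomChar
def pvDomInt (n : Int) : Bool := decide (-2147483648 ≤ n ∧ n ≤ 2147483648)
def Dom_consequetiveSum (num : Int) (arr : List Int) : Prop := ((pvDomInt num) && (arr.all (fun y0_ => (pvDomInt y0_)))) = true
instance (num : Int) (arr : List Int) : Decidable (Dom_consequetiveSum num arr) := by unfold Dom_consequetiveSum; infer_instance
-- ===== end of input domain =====

-- B replaces the element-by-element run counter with a separator-gap computation (an alternative decomposition, same cost).
-- Like A, it only counts runs of `num` that are closed by a later non-`num` element (a trailing run is ignored by both).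

-- ===== PORT A =====
-- the while loop over i with state (count, max_count), as structural recursion over arr
def pvRunLoop (num count maxCount : Int) : List Int → Int
  | [] => maxCount
  | x :: xs =>
      if x == num then pvRunLoop num (count + 1) maxCount xs
      else pvRunLoop num 0 (if count > maxCount then count else maxCount) xs

def consequetiveSum (num : Int) (arr : List Int) : Int :=
  num * pvRunLoop num 0 0 arr

-- ===== PORT B =====
-- the comprehension [i for i, x in enumerate(arr) if x != num]
def pvSepsFrom (num : Int) (arr : List Int) (i : Int) : List Int :=
  match arr with
  | [] => []
  | x :: xs => if x != num then i :: pvSepsFrom num xs (i + 1) else pvSepsFrom num xs (i + 1)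

-- the for-loop over seps with state (prev, best)
def pvGapLoop (prev best : Int) : List Int → Int
  | [] => best
  | s :: ss =>
      let gap := s - prev - 1
      pvGapLoop s (if gap > best then gap else best) ss

def consequetiveSum_alt (num : Int) (arr : List Int) : Int :=
  num * pvGapLoop (-1) 0 (pvSepsFrom num arr 0)

-- ===== PRECONDITION & SPEC =====
def Spec_consequetiveSum (num : Int) (arr : List Int) (out : Int) : Prop := out = consequetiveSum_alt num arr
instance (num : Int) (arr : List Int) (out : Int) : Decidable (Spec_consequetiveSum num arr out) := by unfold Spec_consequetiveSum; infer_instance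

-- ===== CLAIM (what is proved, stated in full; the proofs are below) =====
def Claim_equal_consequetiveSum : Prop := ∀ (num : Int) (arr : List Int), Dom_consequetiveSum num arr → Spec_consequetiveSum num arr (consequetiveSum num arr)

-- ===== LEMMAS AND PROOFS =====

-- Invariant: at position i with last separator prev, A's current run counter equals i - prev - 1.
theorem pvLoop_eq (num : Int) : ∀ (xs : List Int) (i prev best : Int),
    pvRunLoop num (i - prev - 1) best xs = pvGapLoop prev best (pvSepsFrom num xs i) := by
  intro xs
  induction xs with
  | nil => intro i prev best; simp [pvRunLoop, pvSepsFrom, pvGapLoop]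
  | cons x xs ih =>
    intro i prev best
    by_cases hx : x = num
    · simp only [pvRunLoop, pvSepsFrom, hx, BEq.rfl, bne_self_eq_false, if_true, if_false,
        Bool.false_eq_true]
      have h1 : i - prev - 1 + 1 = (i + 1) - prev - 1 := by ring
      rw [h1]; exact ih (i + 1) prev best
    · have hb : (x == num) = false := by simp [hx]
      have hb' : (x != num) = true := by simp [hx]
      simp only [pvRunLoop, pvSepsFrom, pvGapLoop, hb, hb', if_true, if_false,
        Bool.false_eq_true]
      have h0 : (0 : Int) = (i + 1) - i - 1 := by ring
      rw [h0]; exact ih (i + 1) i _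

-- ===== VERDICT (by name: the statement is the Claim_ definition above) =====
theorem consequetiveSum_spec : Claim_equal_consequetiveSum := by
  intro num arr _
  unfold Spec_consequetiveSum consequetiveSum consequetiveSum_alt
  have h := pvLoop_eq num arr 0 (-1) 0
  have h0 : (0 : Int) - (-1) - 1 = 0 := by ring
  rw [h0] at h
  rw [h]
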